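-- pv_equiv track=rewrite | github.com/ayushrakesh/Data-Structures-and-Algorithms | a.py | recoverDeadPods
-- ===== SOURCE A (Python) =====
-- class UnionFind:
--     def __init__(self, size):
--         self.parent = list(range(size))
--         self.rank = [0] * size
--
--     def find(self, x):
--         if self.parent[x] != x:
--             self.parent[x] = self.find(self.parent[x])
--         return self.parent[x]
--
--     def union(self, x, y):
--         rootX = self.find(x)
--         rootY = self.find(y)
--
--         if rootX != rootY:
--             if self.rank[rootX] > self.rank[rootY]:
--                 self.parent[rootY] = rootX
--             elif self.rank[rootX] < self.rank[rootY]: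
--                 self.parent[rootX] = rootY
--             else:
--                 self.parent[rootY] = rootX
--                 self.rank[rootX] += 1
--
-- def recoverDeadPods(pods, connections, queries):
--     uf = UnionFind(pods + 1)
--     active_pods = [set() for _ in range(pods + 1)]
--
-- #Create connections
--     for u, v in connections:
--         uf.union(u, v)
--
-- #Initialize all pods as active
--     for pod in range(1, pods + 1):
--         region = uf.find(pod)
--         active_pods[region].add(pod)
--
--     results = []
--     for query in queries:
--         type_q, pod_id = query
--         region = uf.find(pod_id)
--
--         if type_q == 1:  # Data-sending query
--             if not active_pods[region]:
--                 results.append(-1)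
--             else:
--                 results.append(min(active_pods[region]))
--         elif type_q == 2:  # Database-connection-failure query
--             if pod_id in active_pods[region]:
--                 active_pods[region].remove(pod_id)
--
--     return results
-- ===== SOURCE B (Python) =====
-- def recoverDeadPods(pods, connections, queries):
--     n = pods + 1
--     parent = list(range(n))
--     rank = [0] * n
--
--     def find(x):
--         if parent[x] != x:
--             parent[x] = find(parent[x])
--         return parent[x]
--
--     def union(x, y):
--         rx, ry = find(x), find(y)
--         if rx != ry:
--             if rank[rx] > rank[ry]:
--                 parent[ry] = rx
--             elif rank[rx] < rank[ry]:
--                 parent[rx] = ry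
--             else:
--                 parent[ry] = rx
--                 rank[rx] += 1
--
--     for u, v in connections:
--         union(u, v)
--
--     # Per region: its pods in increasing order, plus each pod's region label.
--     region_of = [0] * n
--     members = [[] for _ in range(n)]
--     for pod in range(1, pods + 1):
--         r = find(pod)
--         region_of[pod] = r
--         members[r].append(pod)
--
--     # Lazy pointer per region + one deleted-flag array: each type-1 query is
--     # amortized O(1) instead of a min() scan over the whole region.
--     ptr = [0] * n
--     deleted = [False] * n
--     results = []
--     for t, p in queries:
--         r = find(p)
--         if t == 1:
--             lst = members[r]
--             i = ptr[r]
--             while i < len(lst) and deleted[lst[i]]: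
--                 i += 1
--             ptr[r] = i
--             results.append(lst[i] if i < len(lst) else -1)
--         elif t == 2:
--             if 1 <= p <= pods and region_of[p] == r:
--                 deleted[p] = True
--     return results
-- ===== Notes on version B (the rewrite author's own statement) =====
-- stated objective: faster
-- what changed: B answers each type-1 query from a per-region sorted member list consumed by a lazy pointer over a single deleted-flag array (amortized O(1) per query, guarded deletions via a region_of table), instead of A's per-query min() scan over a mutable Python set per region; the union-find connectivity phase is shared.
import Mathlib
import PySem

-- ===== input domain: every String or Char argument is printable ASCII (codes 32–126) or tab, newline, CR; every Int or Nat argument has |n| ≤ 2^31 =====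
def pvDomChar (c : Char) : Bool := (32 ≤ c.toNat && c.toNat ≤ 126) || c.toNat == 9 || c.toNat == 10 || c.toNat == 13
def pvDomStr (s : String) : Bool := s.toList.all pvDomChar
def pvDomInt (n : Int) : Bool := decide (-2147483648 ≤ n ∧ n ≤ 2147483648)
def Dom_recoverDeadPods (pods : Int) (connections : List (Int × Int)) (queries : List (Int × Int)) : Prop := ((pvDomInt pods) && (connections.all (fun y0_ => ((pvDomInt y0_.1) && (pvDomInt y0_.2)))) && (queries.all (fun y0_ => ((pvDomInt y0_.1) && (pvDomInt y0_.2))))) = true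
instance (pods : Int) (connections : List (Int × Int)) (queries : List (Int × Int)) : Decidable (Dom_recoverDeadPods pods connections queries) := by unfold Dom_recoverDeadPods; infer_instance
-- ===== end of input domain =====

-- B replaces A's per-query min() scan over a Python set with per-region sorted member
-- lists consumed by a lazy pointer plus one deleted-flag array (amortized O(1) per query);
-- the union-find connectivity phase is shared.  A mutates no argument; return values only.

-- ===== PORT A =====
-- UnionFind.find, with fuel (parent.length + 1 always suffices for a Python run that
-- returns: the parent chain visits distinct in-range nodes); the fuel-0 branch is unreachable there.
def ufFind (fuel : Nat) (parent : List Int) (x : Int) : List Int × Int :=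
  match fuel with
  | 0 => (parent, 0)
  | f + 1 =>
    let px := PySem.List.pyGetD parent x 0
    if px ≠ x then
      let res := ufFind f parent px
      let p2 := PySem.List.pySetD res.1 x res.2
      (p2, PySem.List.pyGetD p2 x 0)
    else
      (parent, px)

-- UnionFind.union (state = (parent, rank))
def ufUnion (pr : List Int × List Int) (x y : Int) : List Int × List Int :=
  let f1 := ufFind (pr.1.length + 1) pr.1 x
  let rootX := f1.2
  let f2 := ufFind (f1.1.length + 1) f1.1 y
  let rootY := f2.2
  let parent := f2.1
  let rank := pr.2
  if rootX ≠ rootY then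
    if PySem.List.pyGetD rank rootX 0 > PySem.List.pyGetD rank rootY 0 then
      (PySem.List.pySetD parent rootY rootX, rank)
    else if PySem.List.pyGetD rank rootX 0 < PySem.List.pyGetD rank rootY 0 then
      (PySem.List.pySetD parent rootX rootY, rank)
    else
      (PySem.List.pySetD parent rootY rootX,
       PySem.List.pySetD rank rootX (PySem.List.pyGetD rank rootX 0 + 1))
  else (parent, rank)

-- one iteration of A's "initialize all pods as active" loop
def istepA (st : List Int × List (PySem.Set Int)) (pod : Int) : List Int × List (PySem.Set Int) :=
  let f := ufFind (st.1.length + 1) st.1 pod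
  (f.1, PySem.List.pySetD st.2 f.2 (PySem.Set.add (PySem.List.pyGetD st.2 f.2 PySem.Set.empty) pod))

-- one iteration of A's query loop (state = (parent, active_pods, results))
def qstepA (st : List Int × List (PySem.Set Int) × List Int) (q : Int × Int) :
    List Int × List (PySem.Set Int) × List Int :=
  let f := ufFind (st.1.length + 1) st.1 q.2
  let region := f.2
  if q.1 = 1 then
    let s := PySem.List.pyGetD st.2.1 region PySem.Set.empty
    if s.isEmpty then (f.1, st.2.1, st.2.2 ++ [-1])
    else
      (f.1, st.2.1,
       st.2.2 ++ [match PySem.List.min? s (fun x => x) with | some m => m | none => 0])  -- min over a nonempty set; none unreachable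
  else if q.1 = 2 then
    let s := PySem.List.pyGetD st.2.1 region PySem.Set.empty
    if PySem.Set.contains s q.2 then
      (f.1, PySem.List.pySetD st.2.1 region (PySem.Set.discard s q.2), st.2.2)
    else (f.1, st.2.1, st.2.2)
  else (f.1, st.2.1, st.2.2)

def recoverDeadPods (pods : Int) (connections : List (Int × Int)) (queries : List (Int × Int)) : List Int :=
  let n := pods + 1
  let pr0 : List Int × List Int := (PySem.List.pyRange 0 n 1, List.replicate n.toNat 0)
  let pr := connections.foldl (fun st c => ufUnion st c.1 c.2) pr0
  let active0 : List (PySem.Set Int) := List.replicate n.toNat PySem.Set.empty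
  let s1 := (PySem.List.pyRange 1 n 1).foldl istepA (pr.1, active0)
  let s2 := queries.foldl qstepA (s1.1, s1.2, ([] : List Int))
  s2.2.2

-- ===== PORT B =====
-- the "while i < len(lst) and deleted[lst[i]]" advance of B's lazy pointer
def skipDel (deleted : List Bool) (lst : List Int) (i : Nat) : Nat :=
  if h : i < lst.length then
    if PySem.List.pyGetD deleted (lst[i]) false then skipDel deleted lst (i + 1) else i
  else i
termination_by lst.length - i

-- one iteration of B's grouping loop (state = (parent, region_of, members))
def istepB (st : List Int × List Int × List (List Int)) (pod : Int) :
    List Int × List Int × List (List Int) :=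
  let f := ufFind (st.1.length + 1) st.1 pod
  (f.1, PySem.List.pySetD st.2.1 pod f.2,
   PySem.List.pySetD st.2.2 f.2 (PySem.List.pyGetD st.2.2 f.2 [] ++ [pod]))

-- one iteration of B's query loop (state = (parent, ptr, deleted, results));
-- ptr holds the lazy pointers (nonnegative by construction, stored as Nat)
def qstepB (pods : Int) (members : List (List Int)) (regionOf : List Int)
    (st : List Int × List Nat × List Bool × List Int) (q : Int × Int) :
    List Int × List Nat × List Bool × List Int :=
  let f := ufFind (st.1.length + 1) st.1 q.2
  let r := f.2
  if q.1 = 1 then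
    let lst := PySem.List.pyGetD members r []
    let i := skipDel st.2.2.1 lst (PySem.List.pyGetD st.2.1 r 0)
    (f.1, PySem.List.pySetD st.2.1 r i, st.2.2.1,
     st.2.2.2 ++ [if h : i < lst.length then lst[i] else -1])
  else if q.1 = 2 then
    if 1 ≤ q.2 ∧ q.2 ≤ pods ∧ PySem.List.pyGetD regionOf q.2 0 = r then
      (f.1, st.2.1, PySem.List.pySetD st.2.2.1 q.2 true, st.2.2.2)
    else (f.1, st.2.1, st.2.2.1, st.2.2.2)
  else (f.1, st.2.1, st.2.2.1, st.2.2.2)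

def recoverDeadPods_alt (pods : Int) (connections : List (Int × Int)) (queries : List (Int × Int)) : List Int :=
  let n := pods + 1
  let pr0 : List Int × List Int := (PySem.List.pyRange 0 n 1, List.replicate n.toNat 0)
  let pr := connections.foldl (fun st c => ufUnion st c.1 c.2) pr0
  let s1 := (PySem.List.pyRange 1 n 1).foldl istepB
      (pr.1, List.replicate n.toNat 0, List.replicate n.toNat ([] : List Int))
  let s2 := queries.foldl (qstepB pods s1.2.2 s1.2.1)
      (s1.1, List.replicate n.toNat 0, List.replicate n.toNat false, ([] : List Int))
  s2.2.2.2

-- ===== PRECONDITION & SPEC =====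
-- Pre_ excludes exactly the inputs on which A raises IndexError: a connection endpoint or a
-- query pod id outside Python's list-index range [-(pods+1), pods] of the parent array.
def Pre_recoverDeadPods (pods : Int) (connections : List (Int × Int)) (queries : List (Int × Int)) : Prop :=
  (∀ c ∈ connections, -(pods + 1) ≤ c.1 ∧ c.1 ≤ pods ∧ -(pods + 1) ≤ c.2 ∧ c.2 ≤ pods) ∧
  (∀ q ∈ queries, -(pods + 1) ≤ q.2 ∧ q.2 ≤ pods)
instance (pods : Int) (connections : List (Int × Int)) (queries : List (Int × Int)) : Decidable (Pre_recoverDeadPods pods connections queries) := by unfold Pre_recoverDeadPods; infer_instance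

def pvWitness_recoverDeadPods : Int × (List (Int × Int)) × (List (Int × Int)) :=
  (3, [(1, 2)], [(1, 1), (2, 1), (1, 2)])

def Spec_recoverDeadPods (pods : Int) (connections : List (Int × Int)) (queries : List (Int × Int)) (out : List Int) : Prop := out = recoverDeadPods_alt pods connections queries
instance (pods : Int) (connections : List (Int × Int)) (queries : List (Int × Int)) (out : List Int) : Decidable (Spec_recoverDeadPods pods connections queries out) := by unfold Spec_recoverDeadPods; infer_instance

-- ===== CLAIM (what is proved, stated in full; the proofs are below) =====
def Claim_equal_recoverDeadPods : Prop := ∀ (pods : Int) (connections : List (Int × Int)) (queries : List (Int × Int)), Dom_recoverDeadPods pods connections queries → Pre_recoverDeadPods pods connections queries → Spec_recoverDeadPods pods connections queries (recoverDeadPods pods connections queries)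

-- ===== LEMMAS AND PROOFS =====

theorem pyGetD_mem_or {α : Type} (xs : List α) (i : Int) (d : α) :
    PySem.List.pyGetD xs i d = d ∨ PySem.List.pyGetD xs i d ∈ xs := by
  unfold PySem.List.pyGetD
  cases h : PySem.List.pyGet? xs i with
  | none => left; rfl
  | some a => right; simpa using PySem.List.mem_of_pyGet?_eq_some _ h

theorem mem_pySetD {α : Type} {a : α} (xs : List α) (i : Int) (v : α) :
    a ∈ PySem.List.pySetD xs i v → a ∈ xs ∨ a = v := by
  unfold PySem.List.pySetD
  cases h : PySem.List.pySet? xs i v with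
  | none => intro hm; exact Or.inl (by simpa using hm)
  | some l =>
    intro hm
    unfold PySem.List.pySet? at h
    cases hk : PySem.List.pyIdx? xs.length i with
    | none => rw [hk] at h; simp at h
    | some k =>
      rw [hk] at h; simp at h
      subst h
      simp at hm
      rcases List.mem_or_eq_of_mem_set hm with h1 | h1
      · exact Or.inl h1
      · exact Or.inr h1

theorem pyGetD_replicate {α : Type} (n : Nat) (i : Int) (d : α) :
    PySem.List.pyGetD (List.replicate n d) i d = d := by
  rcases pyGetD_mem_or (List.replicate n d) i d with h | h
  · exact h
  · exact List.eq_of_mem_replicate h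

-- invariant about the shared parent array
def PFact (n : Nat) (parent : List Int) : Prop :=
  parent.length = n ∧ ∀ e ∈ parent, 0 ≤ e ∧ e < (n : Int)

theorem ufFind_pfact {n : Nat} (hn : 0 < n) (f : Nat) (parent : List Int) (x : Int)
    (h : PFact n parent) :
    PFact n (ufFind f parent x).1 ∧ 0 ≤ (ufFind f parent x).2 ∧ (ufFind f parent x).2 < (n : Int) := by
  induction f generalizing parent x with
  | zero => exact ⟨h, by simp [ufFind], by simp only [ufFind]; exact_mod_cast hn⟩
  | succ f ih =>
    obtain ⟨hlen, hmem⟩ := h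
    simp only [ufFind]
    by_cases hx : PySem.List.pyGetD parent x 0 ≠ x
    · simp only [if_pos hx]
      obtain ⟨⟨hl1, hm1⟩, hr0, hr1⟩ := ih parent (PySem.List.pyGetD parent x 0) ⟨hlen, hmem⟩
      have hplen : (PySem.List.pySetD (ufFind f parent (PySem.List.pyGetD parent x 0)).1 x
          (ufFind f parent (PySem.List.pyGetD parent x 0)).2).length = n := by
        rw [PySem.List.length_pySetD]; exact hl1
      have hpmem : ∀ e ∈ PySem.List.pySetD (ufFind f parent (PySem.List.pyGetD parent x 0)).1 x
          (ufFind f parent (PySem.List.pyGetD parent x 0)).2, 0 ≤ e ∧ e < (n : Int) := by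
        intro e he
        rcases mem_pySetD _ _ _ he with h1 | h1
        · exact hm1 e h1
        · subst h1; exact ⟨hr0, hr1⟩
      refine ⟨⟨hplen, hpmem⟩, ?_⟩
      rcases pyGetD_mem_or (PySem.List.pySetD (ufFind f parent (PySem.List.pyGetD parent x 0)).1 x
          (ufFind f parent (PySem.List.pyGetD parent x 0)).2) x 0 with h2 | h2
      · rw [h2]; exact ⟨le_refl 0, by exact_mod_cast hn⟩
      · exact hpmem _ h2
    · simp only [if_neg hx]
      refine ⟨⟨hlen, hmem⟩, ?_⟩
      rcases pyGetD_mem_or parent x 0 with h2 | h2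
      · rw [h2]; exact ⟨le_refl 0, by exact_mod_cast hn⟩
      · exact hmem _ h2

theorem ufUnion_pfact {n : Nat} (hn : 0 < n) (pr : List Int × List Int) (x y : Int)
    (h : PFact n pr.1) : PFact n (ufUnion pr x y).1 := by
  obtain ⟨h1, hx0, hx1⟩ := ufFind_pfact hn (pr.1.length + 1) pr.1 x h
  obtain ⟨h2, hy0, hy1⟩ := ufFind_pfact hn ((ufFind (pr.1.length + 1) pr.1 x).1.length + 1)
      (ufFind (pr.1.length + 1) pr.1 x).1 y h1
  obtain ⟨hl2, hm2⟩ := h2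
  unfold ufUnion
  dsimp only
  have hset : ∀ (i v : Int), 0 ≤ v → v < (n : Int) →
      PFact n (PySem.List.pySetD (ufFind ((ufFind (pr.1.length + 1) pr.1 x).1.length + 1)
        (ufFind (pr.1.length + 1) pr.1 x).1 y).1 i v) := by
    intro i v hv0 hv1
    constructor
    · rw [PySem.List.length_pySetD]; exact hl2
    · intro e he
      rcases mem_pySetD _ _ _ he with h3 | h3
      · exact hm2 e h3
      · subst h3; exact ⟨hv0, hv1⟩
  split_ifs <;> dsimp only
  · exact hset _ _ hx0 hx1
  · exact hset _ _ hy0 hy1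
  · exact hset _ _ hx0 hx1
  · exact ⟨hl2, hm2⟩

theorem min?_sorted_head (a : Int) (t : List Int) (hp : (a :: t).Pairwise (· < ·)) :
    PySem.List.min? (a :: t) (fun x => x) = some a := by
  cases hm : PySem.List.min? (a :: t) (fun x => x) with
  | none => rw [PySem.List.min?_eq_none_iff] at hm; simp at hm
  | some m =>
    have hmem := PySem.List.min?_mem hm
    have hmin := PySem.List.min?_isMin hm a (by simp)
    rcases List.mem_cons.1 hmem with h | h
    · rw [h]
    · exfalso
      have : a < m := (List.pairwise_cons.1 hp).1 m h
      omega

theorem skipDel_le (d : List Bool) (lst : List Int) (i : Nat) (h0 : i ≤ lst.length) :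
    skipDel d lst i ≤ lst.length := by
  fun_induction skipDel with
  | case1 i h hd ih => exact ih (by omega)
  | case2 i h hd => omega
  | case3 i h => omega

theorem skipDel_stop (d : List Bool) (lst : List Int) (i : Nat)
    (h : skipDel d lst i < lst.length) :
    PySem.List.pyGetD d (lst[skipDel d lst i]'h) false = false := by
  fun_induction skipDel with
  | case1 i h1 hd ih => exact ih h
  | case2 i h1 hd => simpa using hd
  | case3 i h1 => omega

theorem skipDel_filter (d : List Bool) (lst : List Int) (i : Nat) :
    (lst.drop (skipDel d lst i)).filter (fun q => !PySem.List.pyGetD d q false)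
      = (lst.drop i).filter (fun q => !PySem.List.pyGetD d q false) := by
  fun_induction skipDel with
  | case1 i h hd ih =>
    rw [ih, List.drop_eq_getElem_cons h, List.filter_cons_of_neg (by simpa using hd)]
  | case2 i h hd => rfl
  | case3 i h => rfl

theorem skipDel_take (d : List Bool) (lst : List Int) (i : Nat)
    (h0 : ∀ q ∈ lst.take i, PySem.List.pyGetD d q false = true) :
    ∀ q ∈ lst.take (skipDel d lst i), PySem.List.pyGetD d q false = true := by
  fun_induction skipDel with
  | case1 i h hd ih =>
    refine ih ?_
    intro q hq
    rw [List.take_add_one] at hq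
    simp at hq
    rcases hq with hq | hq
    · exact h0 q (by simpa using hq)
    · rw [List.getElem?_eq_getElem h] at hq; simp at hq; subst hq; simpa using hd
  | case2 i h hd => exact h0
  | case3 i h => exact h0

theorem pyGetD_pySetD_gen {α : Type} (l : List α) (p q : Int) (v d : α) (hp : 0 ≤ p)
    (hq : 0 ≤ q) (hlen : p.toNat < l.length) :
    PySem.List.pyGetD (PySem.List.pySetD l p v) q d
      = if q = p then v else PySem.List.pyGetD l q d := by
  rw [PySem.List.pySetD_of_nonneg _ _ hp, PySem.List.pyGetD_of_nonneg _ _ hq,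
      PySem.List.pyGetD_of_nonneg _ _ hq]
  by_cases hqp : q = p
  · subst hqp
    simp [List.getD, hlen]
  · have : q.toNat ≠ p.toNat := by omega
    simp [List.getD, List.getElem?_set_ne (by omega : p.toNat ≠ q.toNat), hqp]

theorem pyGetD_del_set (del : List Bool) (p q : Int) (hp : 0 ≤ p) (hq : 0 ≤ q)
    (hlen : p.toNat < del.length) :
    PySem.List.pyGetD (PySem.List.pySetD del p true) q false
      = if q = p then true else PySem.List.pyGetD del q false :=
  pyGetD_pySetD_gen del p q true false hp hq hlen

theorem filter_del_set (del : List Bool) (p : Int) (hp : 0 ≤ p) (hlen : p.toNat < del.length)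
    (ms : List Int) (hms : ∀ q ∈ ms, 0 ≤ q) :
    ms.filter (fun q => !PySem.List.pyGetD (PySem.List.pySetD del p true) q false)
      = (ms.filter (fun q => !PySem.List.pyGetD del q false)).filter (fun y => !(y == p)) := by
  induction ms with
  | nil => rfl
  | cons a t ih =>
    have ha := hms a (by simp)
    have ht : ∀ q ∈ t, 0 ≤ q := fun q hq => hms q (by simp [hq])
    have hpt := pyGetD_del_set del p a hp ha hlen
    by_cases hap : a = p
    · subst hap
      rw [List.filter_cons_of_neg (by simp [hpt])]
      rw [ih ht]
      by_cases hd : PySem.List.pyGetD del a false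
      · rw [List.filter_cons_of_neg (by simp [hd])]
      · rw [List.filter_cons_of_pos (by simp [hd]), List.filter_cons_of_neg (by simp)]
    · by_cases hd : PySem.List.pyGetD del a false
      · rw [List.filter_cons_of_neg (by simp [hpt, hap, hd]), ih ht,
            List.filter_cons_of_neg (by simp [hd])]
      · rw [List.filter_cons_of_pos (by simp [hpt, hap, hd]), ih ht,
            List.filter_cons_of_pos (by simp [hd]), List.filter_cons_of_pos (by simp [hap])]

theorem getD_set_self {α : Type} (l : List α) (i : Nat) (v d : α) (h : i < l.length) :
    (l.set i v).getD i d = v := by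
  simp [List.getD, h]

theorem getD_set_ne {α : Type} (l : List α) (i j : Nat) (v d : α) (h : j ≠ i) :
    (l.set i v).getD j d = l.getD j d := by
  simp [List.getD, List.getElem?_set_ne (by omega : i ≠ j)]

-- static facts about B's grouping tables, established by the initialization loop
def MStat (pods : Int) (members : List (List Int)) (regionOf : List Int) : Prop :=
  members.length = (pods + 1).toNat ∧ regionOf.length = (pods + 1).toNat ∧
  (∀ j, j < members.length →
    (members.getD j []).Pairwise (· < ·) ∧
    ∀ q ∈ members.getD j [], 1 ≤ q ∧ q ≤ pods ∧ PySem.List.pyGetD regionOf q 0 = (j : Int)) ∧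
  (∀ p : Int, 1 ≤ p → p ≤ pods →
    p ∈ members.getD (PySem.List.pyGetD regionOf p 0).toNat [])

-- the joint invariant of the two query loops
def QInv (pods : Int) (members : List (List Int))
    (stA : List Int × List (PySem.Set Int) × List Int)
    (stB : List Int × List Nat × List Bool × List Int) : Prop :=
  stA.1 = stB.1 ∧ PFact (pods + 1).toNat stA.1 ∧ stA.2.2 = stB.2.2.2 ∧
  stA.2.1.length = members.length ∧ stB.2.1.length = members.length ∧
  stB.2.2.1.length = (pods + 1).toNat ∧
  ∀ j, j < members.length →
    stB.2.1.getD j 0 ≤ (members.getD j []).length ∧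
    (stA.2.1.getD j PySem.Set.empty : List Int)
      = ((members.getD j []).drop (stB.2.1.getD j 0)).filter
          (fun q => !PySem.List.pyGetD stB.2.2.1 q false) ∧
    ∀ q ∈ (members.getD j []).take (stB.2.1.getD j 0),
      PySem.List.pyGetD stB.2.2.1 q false = true

theorem ufFind_nil (x : Int) : ufFind 1 [] x = ([], 0) := by
  have h0 : PySem.List.pyGetD ([] : List Int) x 0 = 0 := by
    rcases pyGetD_mem_or ([] : List Int) x 0 with h | h
    · exact h
    · simp at h
  have hs : ∀ v : Int, PySem.List.pySetD ([] : List Int) x v = [] := by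
    intro v
    unfold PySem.List.pySetD PySem.List.pySet?
    cases PySem.List.pyIdx? (List.length ([] : List Int)) x <;> simp
  simp only [ufFind]
  by_cases hx : PySem.List.pyGetD ([] : List Int) x 0 ≠ x
  · simp only [if_pos hx]
    simp [ufFind, hs, h0]
  · simp only [if_neg hx]
    simp [h0]

theorem pyGetD_nil {α : Type} (i : Int) (d : α) : PySem.List.pyGetD ([] : List α) i d = d := by
  rcases pyGetD_mem_or ([] : List α) i d with h | h
  · exact h
  · simp at h

theorem pySetD_nil {α : Type} (i : Int) (v : α) : PySem.List.pySetD ([] : List α) i v = [] := by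
  unfold PySem.List.pySetD PySem.List.pySet?
  cases PySem.List.pyIdx? (List.length ([] : List α)) i <;> simp

theorem qstep_inv (pods : Int) (members : List (List Int)) (regionOf : List Int)
    (hm : MStat pods members regionOf)
    (stA : List Int × List (PySem.Set Int) × List Int)
    (stB : List Int × List Nat × List Bool × List Int) (q : Int × Int)
    (h : QInv pods members stA stB) :
    QInv pods members (qstepA stA q) (qstepB pods members regionOf stB q) := by
  obtain ⟨h1, hpf, hres, hAlen, hPlen, hDlen, hinv⟩ := h
  obtain ⟨hm1, hm2, hm3, hm4⟩ := hm
  by_cases hn : (pods + 1).toNat = 0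
  · -- degenerate: pods + 1 ≤ 0, every array is empty, every query answers -1 / is a no-op
    obtain ⟨hpl, hpe⟩ := hpf
    have hmem0 : members = [] := List.length_eq_zero_iff.mp (by omega)
    have hA1 : stA.1 = [] := List.length_eq_zero_iff.mp (by omega)
    have hB1 : stB.1 = [] := h1 ▸ hA1
    have hA2 : stA.2.1 = [] := List.length_eq_zero_iff.mp (by omega)
    have hP : stB.2.1 = [] := List.length_eq_zero_iff.mp (by omega)
    have hD : stB.2.2.1 = [] := List.length_eq_zero_iff.mp (by omega)
    have hpods : pods ≤ -1 := by omega
    have hg : ¬(1 ≤ q.2 ∧ q.2 ≤ pods ∧ PySem.List.pyGetD regionOf q.2 0 = (ufFind (stB.1.length + 1) stB.1 q.2).2) := by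
      rintro ⟨ha, hb, -⟩; omega
    unfold qstepA qstepB
    rw [hA1, hB1, hA2, hP, hD, hmem0]
    simp only [List.length_nil, ufFind_nil, pyGetD_nil]
    by_cases hq1 : q.1 = 1
    · simp only [if_pos hq1]
      simp [skipDel, QInv, PFact, hres, hA1, hA2, hP, hD, hmem0, pySetD_nil, ufFind_nil,
        PySem.Set.empty, hDlen, hn]
    · simp only [if_neg hq1]
      rw [hB1] at hg
      simp only [List.length_nil, ufFind_nil] at hg
      by_cases hq2 : q.1 = 2
      · simp only [if_pos hq2, if_neg hg]
        simp [QInv, PFact, hres, hA1, hA2, hP, hD, hmem0, PySem.Set.contains, hDlen, hn,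
          PySem.Set.empty, ufFind_nil]
      · simp only [if_neg hq2]
        simp [QInv, PFact, hres, hA1, hA2, hP, hD, hmem0, hDlen, hn, ufFind_nil]
  · have hn' : 0 < (pods + 1).toNat := Nat.pos_of_ne_zero hn
    unfold qstepA qstepB
    rw [← h1]
    have hFacts := ufFind_pfact hn' (stA.1.length + 1) stA.1 q.2 hpf
    cases hEE : ufFind (stA.1.length + 1) stA.1 q.2 with
    | mk P' r =>
    rw [hEE] at hFacts
    obtain ⟨hpf', hr0, hr1⟩ := hFacts
    dsimp only at hpf' hr0 hr1
    dsimp only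
    have hjr : r.toNat < members.length := by omega
    have hrjr : ((r.toNat : Nat) : Int) = r := Int.toNat_of_nonneg hr0
    simp only [PySem.List.pyGetD_of_nonneg _ _ hr0]
    obtain ⟨hb, hset, htake⟩ := hinv r.toNat hjr
    have hLs := hm3 r.toNat hjr
    have hLmem : ∀ x ∈ members.getD r.toNat [], 1 ≤ x ∧ x ≤ pods :=
      fun x hx => ⟨(hLs.2 x hx).1, (hLs.2 x hx).2.1⟩
    have hsubL : ∀ x ∈ (stA.2.1.getD r.toNat PySem.Set.empty : List Int), x ∈ members.getD r.toNat [] := by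
      intro x hx
      rw [hset] at hx
      exact (List.drop_sublist _ _).mem (List.mem_of_mem_filter hx)
    by_cases hq1 : q.1 = 1
    · simp only [if_pos hq1]
      have hile : skipDel stB.2.2.1 (members.getD r.toNat []) (stB.2.1.getD r.toNat 0)
          ≤ (members.getD r.toNat []).length := skipDel_le _ _ _ hb
      have hfilt : ((members.getD r.toNat []).drop
            (skipDel stB.2.2.1 (members.getD r.toNat []) (stB.2.1.getD r.toNat 0))).filter
            (fun q => !PySem.List.pyGetD stB.2.2.1 q false)
          = (stA.2.1.getD r.toNat PySem.Set.empty : List Int) := by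
        rw [hset]; exact skipDel_filter _ _ _
      by_cases hlt : skipDel stB.2.2.1 (members.getD r.toNat []) (stB.2.1.getD r.toNat 0)
          < (members.getD r.toNat []).length
      · have hstop := skipDel_stop stB.2.2.1 (members.getD r.toNat []) (stB.2.1.getD r.toNat 0) hlt
        have hcons : ((stA.2.1.getD r.toNat PySem.Set.empty : List Int))
            = (members.getD r.toNat [])[skipDel stB.2.2.1 (members.getD r.toNat []) (stB.2.1.getD r.toNat 0)]'hlt
              :: ((members.getD r.toNat []).drop
                    (skipDel stB.2.2.1 (members.getD r.toNat []) (stB.2.1.getD r.toNat 0) + 1)).filter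
                  (fun q => !PySem.List.pyGetD stB.2.2.1 q false) := by
          rw [← hfilt, List.drop_eq_getElem_cons hlt, List.filter_cons_of_pos (by simpa using hstop)]
        have hne : ¬ ((stA.2.1.getD r.toNat PySem.Set.empty : List Int).isEmpty = true) := by
          rw [hcons]; simp
        rw [if_neg hne, dif_pos hlt]
        have hsorted : (stA.2.1.getD r.toNat PySem.Set.empty : List Int).Pairwise (· < ·) := by
          rw [hset]
          exact List.Pairwise.sublist (List.filter_sublist.trans (List.drop_sublist _ _)) hLs.1
        have hmin : PySem.List.min? (stA.2.1.getD r.toNat PySem.Set.empty : List Int) (fun x => x)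
            = some ((members.getD r.toNat [])[skipDel stB.2.2.1 (members.getD r.toNat []) (stB.2.1.getD r.toNat 0)]'hlt) := by
          rw [hcons] at hsorted ⊢
          exact min?_sorted_head _ _ hsorted
        rw [hmin]
        unfold QInv
        refine ⟨rfl, hpf', by simp [hres], by simpa using hAlen, by simpa using hPlen,
          by simpa using hDlen, ?_⟩
        intro j hj
        rw [PySem.List.pySetD_of_nonneg _ _ hr0]
        by_cases hjj : j = r.toNat
        · subst hjj
          rw [getD_set_self _ _ _ _ (by omega)]
          exact ⟨hile, hfilt.symm, skipDel_take _ _ _ htake⟩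
        · rw [getD_set_ne _ _ _ _ _ hjj]
          exact hinv j hj
      · have hempty : (stA.2.1.getD r.toNat PySem.Set.empty : List Int) = [] := by
          rw [← hfilt,
            show skipDel stB.2.2.1 (members.getD r.toNat []) (stB.2.1.getD r.toNat 0)
              = (members.getD r.toNat []).length by omega]
          simp
        rw [if_pos (by rw [hempty]; rfl), dif_neg hlt]
        unfold QInv
        refine ⟨rfl, hpf', by simp [hres], by simpa using hAlen, by simpa using hPlen,
          by simpa using hDlen, ?_⟩
        intro j hj
        rw [PySem.List.pySetD_of_nonneg _ _ hr0]
        by_cases hjj : j = r.toNat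
        · subst hjj
          rw [getD_set_self _ _ _ _ (by omega)]
          exact ⟨hile, hfilt.symm, skipDel_take _ _ _ htake⟩
        · rw [getD_set_ne _ _ _ _ _ hjj]
          exact hinv j hj
    · simp only [if_neg hq1]
      by_cases hq2 : q.1 = 2
      · simp only [if_pos hq2]
        by_cases hc : 1 ≤ q.2 ∧ q.2 ≤ pods ∧ PySem.List.pyGetD regionOf q.2 0 = r
        · obtain ⟨hp1, hp2, hlook⟩ := hc
          have hplen : q.2.toNat < stB.2.2.1.length := by omega
          have hpmem : q.2 ∈ members.getD r.toNat [] := by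
            have := hm4 q.2 hp1 hp2
            rwa [hlook] at this
          have hdel' : ∀ x : Int, 0 ≤ x →
              PySem.List.pyGetD (PySem.List.pySetD stB.2.2.1 q.2 true) x false
                = if x = q.2 then true else PySem.List.pyGetD stB.2.2.1 x false :=
            fun x hx => pyGetD_del_set _ _ _ (by omega) hx hplen
          rw [if_pos (show 1 ≤ q.2 ∧ q.2 ≤ pods ∧ PySem.List.pyGetD regionOf q.2 0 = r from
            ⟨hp1, hp2, hlook⟩)]
          by_cases hmem : q.2 ∈ (stA.2.1.getD r.toNat PySem.Set.empty : List Int)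
          · have hcont : PySem.Set.contains (stA.2.1.getD r.toNat PySem.Set.empty) q.2 = true := by
              rw [PySem.Set.contains_iff]; exact hmem
            rw [if_pos hcont]
            unfold QInv
            refine ⟨rfl, hpf', hres, by simpa using hAlen, hPlen, by simpa using hDlen, ?_⟩
            intro j hj
            obtain ⟨hbj, hsetj, htakej⟩ := hinv j hj
            rw [PySem.List.pySetD_of_nonneg stA.2.1 _ hr0]
            by_cases hjj : j = r.toNat
            · subst hjj
              rw [getD_set_self _ _ _ _ (by omega)]
              refine ⟨hb, ?_, ?_⟩
              · rw [filter_del_set _ _ (by omega) hplen _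
                    (fun x hx => by
                      have := hLmem x ((List.drop_sublist _ _).mem hx); omega),
                    ← hset]
                rfl
              · intro x hx
                rw [hdel' x (by have := hLmem x ((List.take_sublist _ _).mem hx); omega)]
                by_cases hxp : x = q.2
                · simp [hxp]
                · simp [hxp, htake x hx]
            · rw [getD_set_ne _ _ _ _ _ hjj]
              have hpnot : q.2 ∉ members.getD j [] := by
                intro hmem'
                have hl := ((hm3 j hj).2 q.2 hmem').2.2
                rw [hlook] at hl
                omega
              refine ⟨hbj, ?_, ?_⟩
              · rw [hsetj]
                refine (List.filter_congr ?_).symm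
                intro x hx
                have hx0 : 1 ≤ x := ((hm3 j hj).2 x ((List.drop_sublist _ _).mem hx)).1
                have hxp : x ≠ q.2 := fun hh => hpnot (hh ▸ (List.drop_sublist _ _).mem hx)
                rw [hdel' x (by omega)]
                simp [hxp]
              · intro x hx
                have hx0 : 1 ≤ x := ((hm3 j hj).2 x ((List.take_sublist _ _).mem hx)).1
                have hxp : x ≠ q.2 := fun hh => hpnot (hh ▸ (List.take_sublist _ _).mem hx)
                rw [hdel' x (by omega)]
                simp [hxp, htakej x hx]
          · have hcont : ¬ (PySem.Set.contains (stA.2.1.getD r.toNat PySem.Set.empty) q.2 = true) := by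
              rw [PySem.Set.contains_iff]; exact hmem
            rw [if_neg hcont]
            unfold QInv
            refine ⟨rfl, hpf', hres, hAlen, hPlen, by simpa using hDlen, ?_⟩
            intro j hj
            obtain ⟨hbj, hsetj, htakej⟩ := hinv j hj
            by_cases hjj : j = r.toNat
            · subst hjj
              refine ⟨hbj, ?_, ?_⟩
              · rw [hset]
                refine (List.filter_congr ?_).symm
                intro x hx
                have hx0 : 1 ≤ x := (hLmem x ((List.drop_sublist _ _).mem hx)).1
                rw [hdel' x (by omega)]
                by_cases hxp : x = q.2
                · have hdelp : PySem.List.pyGetD stB.2.2.1 x false = true := by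
                    by_contra hdp
                    apply hmem
                    rw [hset, ← hxp]
                    exact List.mem_filter.mpr ⟨hx, by simpa using hdp⟩
                  rw [hxp] at hdelp
                  simp [hxp, hdelp]
                · simp [hxp]
              · intro x hx
                have hx0 : 1 ≤ x := (hLmem x ((List.take_sublist _ _).mem hx)).1
                rw [hdel' x (by omega)]
                by_cases hxp : x = q.2
                · simp [hxp]
                · simp [hxp, htake x hx]
            · have hpnot : q.2 ∉ members.getD j [] := by
                intro hmem'
                have hl := ((hm3 j hj).2 q.2 hmem').2.2
                rw [hlook] at hl
                omega
              refine ⟨hbj, ?_, ?_⟩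
              · rw [hsetj]
                refine (List.filter_congr ?_).symm
                intro x hx
                have hx0 : 1 ≤ x := ((hm3 j hj).2 x ((List.drop_sublist _ _).mem hx)).1
                have hxp : x ≠ q.2 := fun hh => hpnot (hh ▸ (List.drop_sublist _ _).mem hx)
                rw [hdel' x (by omega)]
                simp [hxp]
              · intro x hx
                have hx0 : 1 ≤ x := ((hm3 j hj).2 x ((List.take_sublist _ _).mem hx)).1
                have hxp : x ≠ q.2 := fun hh => hpnot (hh ▸ (List.take_sublist _ _).mem hx)
                rw [hdel' x (by omega)]
                simp [hxp, htakej x hx]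
        · rw [if_neg hc]
          have hnmem : q.2 ∉ (stA.2.1.getD r.toNat PySem.Set.empty : List Int) := by
            intro hpm
            have hLp := hLs.2 q.2 (hsubL q.2 hpm)
            exact hc ⟨hLp.1, hLp.2.1, by rw [hLp.2.2, hrjr]⟩
          have hcont : ¬ (PySem.Set.contains (stA.2.1.getD r.toNat PySem.Set.empty) q.2 = true) := by
            rw [PySem.Set.contains_iff]; exact hnmem
          rw [if_neg hcont]
          exact ⟨rfl, hpf', hres, hAlen, hPlen, hDlen, hinv⟩
      · simp only [if_neg hq2]
        exact ⟨rfl, hpf', hres, hAlen, hPlen, hDlen, hinv⟩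

theorem getD_replicate_self {α : Type} (n : Nat) (d : α) (j : Nat) :
    (List.replicate n d).getD j d = d := by
  unfold List.getD
  cases h : (List.replicate n d)[j]? with
  | none => rfl
  | some a =>
    have := List.mem_of_getElem? h
    simp [List.eq_of_mem_replicate this]

theorem init_inv (pods : Int) (l : List Int) :
    ∀ (parent : List Int) (active : List (PySem.Set Int)) (regionOf : List Int)
      (members : List (List Int)),
    PFact (pods + 1).toNat parent →
    active.length = (pods + 1).toNat →
    regionOf.length = (pods + 1).toNat →
    members.length = (pods + 1).toNat →
    l.Pairwise (· < ·) →
    (∀ p ∈ l, 1 ≤ p ∧ p ≤ pods) →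
    (∀ j, j < (pods + 1).toNat → (active.getD j PySem.Set.empty : List Int) = members.getD j []) →
    (∀ j, j < (pods + 1).toNat → (members.getD j []).Pairwise (· < ·) ∧
       ∀ q ∈ members.getD j [],
         (1 ≤ q ∧ q ≤ pods ∧ PySem.List.pyGetD regionOf q 0 = (j : Int)) ∧ (∀ p ∈ l, q < p)) →
    (∀ p : Int, 1 ≤ p → p ≤ pods →
       p ∈ l ∨ p ∈ members.getD (PySem.List.pyGetD regionOf p 0).toNat []) →
    (l.foldl istepA (parent, active)).1 = (l.foldl istepB (parent, regionOf, members)).1 ∧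
    PFact (pods + 1).toNat (l.foldl istepA (parent, active)).1 ∧
    (l.foldl istepA (parent, active)).2.length = (pods + 1).toNat ∧
    MStat pods (l.foldl istepB (parent, regionOf, members)).2.2
      (l.foldl istepB (parent, regionOf, members)).2.1 ∧
    (∀ j, j < (pods + 1).toNat →
      ((l.foldl istepA (parent, active)).2.getD j PySem.Set.empty : List Int)
        = (l.foldl istepB (parent, regionOf, members)).2.2.getD j []) := by
  induction l with
  | nil =>
    intro parent active regionOf members hpf halen hrlen hmlen hpair hbnd hrel hstat hS4
    refine ⟨rfl, hpf, halen, ⟨hmlen, hrlen, ?_, ?_⟩, fun j hj => hrel j hj⟩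
    · intro j hj
      have hj2 : j < members.length := hj
      rw [hmlen] at hj2
      exact ⟨(hstat j hj2).1, fun q hq => ((hstat j hj2).2 q hq).1⟩
    · intro p hp1 hp2
      rcases hS4 p hp1 hp2 with h | h
      · simp at h
      · exact h
  | cons a t ih =>
    intro parent active regionOf members hpf halen hrlen hmlen hpair hbnd hrel hstat hS4
    have ha := hbnd a (by simp)
    have hn' : 0 < (pods + 1).toNat := by omega
    rw [List.foldl_cons, List.foldl_cons]
    have hFacts := ufFind_pfact hn' (parent.length + 1) parent a hpf
    -- the two steps share the same find call
    have hstepA : istepA (parent, active) a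
        = ((ufFind (parent.length + 1) parent a).1,
           PySem.List.pySetD active (ufFind (parent.length + 1) parent a).2
             (PySem.Set.add (PySem.List.pyGetD active (ufFind (parent.length + 1) parent a).2
                PySem.Set.empty) a)) := rfl
    have hstepB : istepB (parent, regionOf, members) a
        = ((ufFind (parent.length + 1) parent a).1,
           PySem.List.pySetD regionOf a (ufFind (parent.length + 1) parent a).2,
           PySem.List.pySetD members (ufFind (parent.length + 1) parent a).2
             (PySem.List.pyGetD members (ufFind (parent.length + 1) parent a).2 [] ++ [a])) := rfl
    rw [hstepA, hstepB]
    obtain ⟨hpf1, hr0, hr1⟩ := hFacts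
    set F := ufFind (parent.length + 1) parent a with hF
    set r := F.2 with hrr
    have hjrm : r.toNat < (pods + 1).toNat := by omega
    have hrjr : ((r.toNat : Nat) : Int) = r := Int.toNat_of_nonneg hr0
    have ha0 : (0 : Int) ≤ a := by omega
    have hatn : a.toNat < regionOf.length := by omega
    -- the freshly added pod is larger than every stored pod
    have hfresh : ∀ q ∈ members.getD r.toNat [], q < a :=
      fun q hq => ((hstat r.toNat hjrm).2 q hq).2 a (by simp)
    have hnotmem : a ∉ (active.getD r.toNat PySem.Set.empty : List Int) := by
      intro hmem
      have := hfresh a (by rwa [hrel r.toNat hjrm] at hmem)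
      omega
    have hget : PySem.List.pyGetD active r PySem.Set.empty = active.getD r.toNat PySem.Set.empty :=
      PySem.List.pyGetD_of_nonneg _ _ hr0
    have hgetm : PySem.List.pyGetD members r [] = members.getD r.toNat [] :=
      PySem.List.pyGetD_of_nonneg _ _ hr0
    have hadd : PySem.Set.add (PySem.List.pyGetD active r PySem.Set.empty) a
        = members.getD r.toNat [] ++ [a] := by
      rw [hget, PySem.Set.add_of_not_mem hnotmem, hrel r.toNat hjrm]
    rw [hadd]
    apply ih
    · exact hpf1
    · rw [PySem.List.length_pySetD]; exact halen
    · rw [PySem.List.length_pySetD]; exact hrlen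
    · rw [PySem.List.length_pySetD]; exact hmlen
    · exact hpair.tail
    · exact fun p hp => hbnd p (by simp [hp])
    · -- active/members stay pointwise equal
      intro j hj
      rw [PySem.List.pySetD_of_nonneg _ _ hr0, PySem.List.pySetD_of_nonneg _ _ hr0, hgetm]
      by_cases hjj : j = r.toNat
      · subst hjj
        rw [getD_set_self _ _ _ _ (by omega), getD_set_self _ _ _ _ (by omega)]
      · rw [getD_set_ne _ _ _ _ _ hjj, getD_set_ne _ _ _ _ _ hjj]
        exact hrel j hj
    · -- static facts after appending pod a to members[r]
      intro j hj
      rw [PySem.List.pySetD_of_nonneg members _ hr0, hgetm]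
      have hlookup : ∀ q : Int, 0 ≤ q →
          PySem.List.pyGetD (PySem.List.pySetD regionOf a r) q 0
            = if q = a then r else PySem.List.pyGetD regionOf q 0 :=
        fun q hq => pyGetD_pySetD_gen regionOf a q r 0 ha0 hq hatn
      by_cases hjj : j = r.toNat
      · subst hjj
        rw [getD_set_self _ _ _ _ (by omega)]
        constructor
        · rw [List.pairwise_append]
          exact ⟨(hstat r.toNat hj).1, by simp, fun x hx y hy => by
            simp at hy; subst hy; exact hfresh x hx⟩
        · intro q hq
          rcases List.mem_append.1 hq with hq | hq
          · have hold := (hstat r.toNat hj).2 q hq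
            have hqa : q ≠ a := by have := hold.2 a (by simp); omega
            refine ⟨⟨hold.1.1, hold.1.2.1, ?_⟩, fun p hp => hold.2 p (by simp [hp])⟩
            rw [hlookup q (by have := hold.1.1; omega), if_neg hqa]
            exact hold.1.2.2
          · simp at hq
            subst hq
            refine ⟨⟨ha.1, ha.2, ?_⟩, fun p hp => (List.pairwise_cons.1 hpair).1 p hp⟩
            rw [hlookup q (by omega), if_pos rfl, hrjr]
      · rw [getD_set_ne _ _ _ _ _ hjj]
        constructor
        · exact (hstat j hj).1
        · intro q hq
          have hold := (hstat j hj).2 q hq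
          have hqa : q ≠ a := by have := hold.2 a (by simp); omega
          refine ⟨⟨hold.1.1, hold.1.2.1, ?_⟩, fun p hp => hold.2 p (by simp [hp])⟩
          rw [hlookup q (by have := hold.1.1; omega), if_neg hqa]
          exact hold.1.2.2
    · -- every processed pod is stored under its recorded region
      intro p hp1 hp2
      have hlookup : ∀ q : Int, 0 ≤ q →
          PySem.List.pyGetD (PySem.List.pySetD regionOf a r) q 0
            = if q = a then r else PySem.List.pyGetD regionOf q 0 :=
        fun q hq => pyGetD_pySetD_gen regionOf a q r 0 ha0 hq hatn
      by_cases hpa : p = a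
      · subst hpa
        right
        rw [hlookup p (by omega), if_pos rfl,
            PySem.List.pySetD_of_nonneg members _ hr0, hgetm, getD_set_self _ _ _ _ (by omega)]
        simp
      · rcases hS4 p hp1 hp2 with h | h
        · rcases List.mem_cons.1 h with h' | h'
          · exact absurd h' hpa
          · exact Or.inl h'
        · right
          rw [hlookup p (by omega), if_neg hpa,
              PySem.List.pySetD_of_nonneg members _ hr0, hgetm]
          by_cases hjj : (PySem.List.pyGetD regionOf p 0).toNat = r.toNat
          · rw [hjj, getD_set_self _ _ _ _ (by omega)]
            rw [hjj] at h
            exact List.mem_append_left _ h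
          · rw [getD_set_ne _ _ _ _ _ hjj]
            exact h

theorem ufUnion_nil (pr : List Int × List Int) (x y : Int) (h : pr.1 = []) :
    (ufUnion pr x y).1 = [] := by
  unfold ufUnion
  rw [h]
  simp only [List.length_nil, Nat.zero_add, ufFind_nil]
  split_ifs <;> simp [pySetD_nil, ufFind_nil]

theorem foldl_union_pfact (n : Nat) (cs : List (Int × Int)) (pr : List Int × List Int)
    (h : PFact n pr.1) :
    PFact n ((cs.foldl (fun st c => ufUnion st c.1 c.2) pr).1) := by
  induction cs generalizing pr with
  | nil => exact h
  | cons c cs ih =>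
    rw [List.foldl_cons]
    apply ih
    rcases Nat.eq_zero_or_pos n with hn | hn
    · subst hn
      have h1 : pr.1 = [] := List.length_eq_zero_iff.mp h.1
      have h2 := ufUnion_nil pr c.1 c.2 h1
      exact ⟨by rw [h2]; rfl, by rw [h2]; intro e he; simp at he⟩
    · exact ufUnion_pfact hn pr c.1 c.2 h

theorem query_fold (pods : Int) (members : List (List Int)) (regionOf : List Int)
    (hm : MStat pods members regionOf) (qs : List (Int × Int)) :
    ∀ (stA : List Int × List (PySem.Set Int) × List Int)
      (stB : List Int × List Nat × List Bool × List Int),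
    QInv pods members stA stB →
    QInv pods members (qs.foldl qstepA stA) (qs.foldl (qstepB pods members regionOf) stB) := by
  induction qs with
  | nil => intro stA stB h; exact h
  | cons q qs ih =>
    intro stA stB h
    rw [List.foldl_cons, List.foldl_cons]
    exact ih _ _ (qstep_inv pods members regionOf hm stA stB q h)

theorem final_glue (pods : Int) (s1A : List Int × List (PySem.Set Int))
    (s1B : List Int × List Int × List (List Int)) (queries : List (Int × Int))
    (hpeq : s1A.1 = s1B.1) (hpfI : PFact (pods + 1).toNat s1A.1)
    (haLen : s1A.2.length = (pods + 1).toNat)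
    (hmstat : MStat pods s1B.2.2 s1B.2.1)
    (hrelI : ∀ j, j < (pods + 1).toNat →
      (s1A.2.getD j PySem.Set.empty : List Int) = s1B.2.2.getD j []) :
    (queries.foldl qstepA (s1A.1, s1A.2, [])).2.2
      = (queries.foldl (qstepB pods s1B.2.2 s1B.2.1)
          (s1B.1, List.replicate (pods + 1).toNat 0,
           List.replicate (pods + 1).toNat false, [])).2.2.2 := by
  have h0 : QInv pods s1B.2.2 (s1A.1, s1A.2, ([] : List Int))
      (s1B.1, List.replicate (pods + 1).toNat 0,
       List.replicate (pods + 1).toNat false, ([] : List Int)) := by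
    refine ⟨hpeq, hpfI, rfl, by rw [haLen, hmstat.1], by rw [List.length_replicate, hmstat.1],
      List.length_replicate, ?_⟩
    intro j hj
    have hj' : j < (pods + 1).toNat := by rw [← hmstat.1]; exact hj
    refine ⟨by rw [getD_replicate_self]; exact Nat.zero_le _, ?_, ?_⟩
    · rw [getD_replicate_self, List.drop_zero, hrelI j hj']
      refine (List.filter_eq_self.mpr ?_).symm
      intro a ha
      rw [pyGetD_replicate]
      rfl
    · rw [getD_replicate_self]
      simp
  exact (query_fold pods s1B.2.2 s1B.2.1 hmstat queries _ _ h0).2.2.1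

theorem recoverDeadPods_eq (pods : Int) (connections : List (Int × Int))
    (queries : List (Int × Int)) :
    recoverDeadPods pods connections queries = recoverDeadPods_alt pods connections queries := by
  unfold recoverDeadPods recoverDeadPods_alt
  dsimp only
  have hpf0 : PFact (pods + 1).toNat (PySem.List.pyRange 0 (pods + 1) 1) := by
    constructor
    · rw [PySem.List.length_pyRange_one]
      omega
    · intro e he
      rw [PySem.List.mem_pyRange_one] at he
      omega
  have hpfU := foldl_union_pfact (pods + 1).toNat connections
      (PySem.List.pyRange 0 (pods + 1) 1, List.replicate (pods + 1).toNat 0) hpf0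
  have hinit := init_inv pods (PySem.List.pyRange 1 (pods + 1) 1)
      (connections.foldl (fun st c => ufUnion st c.1 c.2)
        (PySem.List.pyRange 0 (pods + 1) 1, List.replicate (pods + 1).toNat 0)).1
      (List.replicate (pods + 1).toNat PySem.Set.empty)
      (List.replicate (pods + 1).toNat 0)
      (List.replicate (pods + 1).toNat ([] : List Int))
      hpfU
      List.length_replicate
      List.length_replicate
      List.length_replicate
      (PySem.List.pairwise_lt_pyRange_one _ _)
      (fun p hp => by rw [PySem.List.mem_pyRange_one] at hp; omega)
      (fun j hj => by rw [getD_replicate_self, getD_replicate_self]; rfl)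
      (fun j hj => by rw [getD_replicate_self]; exact ⟨List.Pairwise.nil, by simp⟩)
      (fun p hp1 hp2 => Or.inl (by rw [PySem.List.mem_pyRange_one]; omega))
  obtain ⟨hpeq, hpfI, haLen, hmstat, hrelI⟩ := hinit
  exact final_glue pods
    ⟨((PySem.List.pyRange 1 (pods + 1) 1).foldl istepA
        ((connections.foldl (fun st c => ufUnion st c.1 c.2)
          (PySem.List.pyRange 0 (pods + 1) 1, List.replicate (pods + 1).toNat 0)).1,
         List.replicate (pods + 1).toNat PySem.Set.empty)).1,
      ((PySem.List.pyRange 1 (pods + 1) 1).foldl istepA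
        ((connections.foldl (fun st c => ufUnion st c.1 c.2)
          (PySem.List.pyRange 0 (pods + 1) 1, List.replicate (pods + 1).toNat 0)).1,
         List.replicate (pods + 1).toNat PySem.Set.empty)).2⟩
    ((PySem.List.pyRange 1 (pods + 1) 1).foldl istepB
        ((connections.foldl (fun st c => ufUnion st c.1 c.2)
          (PySem.List.pyRange 0 (pods + 1) 1, List.replicate (pods + 1).toNat 0)).1,
         List.replicate (pods + 1).toNat 0,
         List.replicate (pods + 1).toNat ([] : List Int)))
    queries hpeq hpfI haLen hmstat hrelI

-- ===== VERDICT (by name: the statement is the Claim_ definition above) =====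
theorem recoverDeadPods_spec : Claim_equal_recoverDeadPods := by
  intro pods connections queries _hdom _hpre
  unfold Spec_recoverDeadPods
  exact recoverDeadPods_eq pods connections queries
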